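-- pv_equiv track=rewrite | github.com/felixyu7/i3_to_parquet | i3_to_parquet.py | aggregate_lists
-- ===== SOURCE A (Python) =====
-- def aggregate_lists(list1, list2):
--     # Initialize a dictionary to hold the aggregated results
--     aggregation = {}
--
--     # Iterate over both lists simultaneously
--     for item1, item2 in zip(list1, list2):
--         # Create a list for each unique item in list2, if not already created
--         if item2 not in aggregation:
--             aggregation[item2] = []
--         # Append the corresponding item from list1 into the list for the key item2
--         aggregation[item2].append(item1)
--
--     # Extract unique keys from list2
--     unique_values_list2 = list(aggregation.keys())
--
--     # Extract the aggregated results into a list of lists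
--     aggregated_list1 = list(aggregation.values())
--
--     # Return the results
--     return unique_values_list2, aggregated_list1
-- ===== SOURCE B (Python) =====
-- def aggregate_lists(list1, list2):
--     # Pair items first (zip truncates to the shorter list, as in A).
--     pairs = list(zip(list1, list2))
--     # Unique keys in first-appearance order.
--     keys = list(dict.fromkeys(k for _, k in pairs))
--     # One fresh scan of the pairs per key.
--     groups = [[x for x, k2 in pairs if k2 == key] for key in keys]
--     return keys, groups
-- ===== Notes on version B (the rewrite author's own statement) =====
-- stated objective: alternative
-- what changed: A builds one dict in a single pass, appending each item to its key's bucket; B first computes the unique keys (first-appearance order) and then rescans the zipped pairs once per key with a filter comprehension.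
import Mathlib
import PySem

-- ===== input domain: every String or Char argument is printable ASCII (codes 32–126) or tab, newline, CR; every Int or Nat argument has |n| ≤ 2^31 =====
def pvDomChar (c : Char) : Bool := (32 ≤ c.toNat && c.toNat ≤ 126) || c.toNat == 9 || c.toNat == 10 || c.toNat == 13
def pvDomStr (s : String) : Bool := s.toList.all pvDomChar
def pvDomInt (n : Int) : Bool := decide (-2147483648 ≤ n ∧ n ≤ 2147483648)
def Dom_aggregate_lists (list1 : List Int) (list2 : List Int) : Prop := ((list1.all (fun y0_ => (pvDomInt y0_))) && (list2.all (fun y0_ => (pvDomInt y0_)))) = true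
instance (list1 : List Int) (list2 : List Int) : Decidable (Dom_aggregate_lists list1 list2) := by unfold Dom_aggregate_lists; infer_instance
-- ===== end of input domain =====

-- B replaces A's single-pass dict aggregation by a keys-first pass plus one filter scan per key
-- (a different decomposition of the grouping, same return value; not claimed faster).

-- ===== PORT A =====
-- A: one pass over zip(list1, list2) into an insertion-ordered dict of buckets; return keys, values.
def aggregate_lists (list1 : List Int) (list2 : List Int) : List Int × List (List Int) :=
  let aggregation := (list1.zip list2).foldl
    (fun d p =>
      -- if item2 not in aggregation: aggregation[item2] = []
      let d := if d.contains p.2 then d else d.insert p.2 ([] : List Int)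
      -- aggregation[item2].append(item1)
      d.insert p.2 (d.getD p.2 [] ++ [p.1]))
    PySem.Dict.empty
  (aggregation.keys, aggregation.values)

-- ===== PORT B =====
-- B: unique keys in first-appearance order, then one filter scan of the pairs per key.
def aggregate_lists_alt (list1 : List Int) (list2 : List Int) : List Int × List (List Int) :=
  let pairs := list1.zip list2
  let keys := PySem.List.dedup (pairs.map (·.2))
  (keys, keys.map (fun k => (pairs.filter (fun p => p.2 == k)).map (·.1)))

-- ===== PRECONDITION & SPEC =====
def Spec_aggregate_lists (list1 : List Int) (list2 : List Int) (out : List Int × List (List Int)) : Prop := out = aggregate_lists_alt list1 list2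
instance (list1 : List Int) (list2 : List Int) (out : List Int × List (List Int)) : Decidable (Spec_aggregate_lists list1 list2 out) := by unfold Spec_aggregate_lists; infer_instance

-- ===== CLAIM (what is proved, stated in full; the proofs are below) =====
def Claim_equal_aggregate_lists : Prop := ∀ (list1 : List Int) (list2 : List Int), Dom_aggregate_lists list1 list2 → Spec_aggregate_lists list1 list2 (aggregate_lists list1 list2)

-- ===== LEMMAS AND PROOFS =====

-- A's loop body (setdefault-to-[] then append) is one dict `modify`.
theorem stepA_eq_modify (d : PySem.Dict Int (List Int)) (p : Int × Int) :
    (let d' := if d.contains p.2 then d else d.insert p.2 ([] : List Int)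
     d'.insert p.2 (d'.getD p.2 [] ++ [p.1])) = d.modify p.2 [] (· ++ [p.1]) := by
  by_cases h : d.contains p.2 = true
  · simp [h, PySem.Dict.modify]
  · have hc : d.contains p.2 = false := by simpa using h
    simp only [hc, Bool.false_eq_true, if_false]
    rw [PySem.Dict.getD_insert_self, PySem.Dict.insert_insert_self,
        PySem.Dict.modify, PySem.Dict.getD_of_not_contains d [] hc]

-- keys of the swapped pairs are the second components, and filtering swapped pairs on the
-- first component then projecting is filtering the pairs on the second then projecting
theorem swap_filter_map (k : Int) (l : List (Int × Int)) :
    ((l.map Prod.swap).filter (fun p => p.1 == k)).map (fun x => x.2)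
      = (l.filter (fun p => p.2 == k)).map (fun x => x.1) := by
  induction l with
  | nil => rfl
  | cons p t ih =>
    by_cases h : p.2 == k <;> simp [h, ih, Prod.swap]

-- A's whole fold, rewritten as the canonical grouping fold over the swapped pairs.
theorem foldA_eq (l : List (Int × Int)) :
    l.foldl
      (fun d p =>
        let d := if d.contains p.2 then d else d.insert p.2 ([] : List Int)
        d.insert p.2 (d.getD p.2 [] ++ [p.1]))
      (PySem.Dict.empty : PySem.Dict Int (List Int))
    = (l.map Prod.swap).foldl (fun d p => d.modify p.1 [] (· ++ [p.2])) PySem.Dict.empty := by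
  rw [List.foldl_map]
  exact PySem.List.foldl_congr_mem l _ _ _ (fun d p _ => stepA_eq_modify d p)

-- ===== VERDICT (by name: the statement is the Claim_ definition above) =====
theorem aggregate_lists_spec : Claim_equal_aggregate_lists := by
  intro list1 list2 _
  unfold Spec_aggregate_lists aggregate_lists aggregate_lists_alt
  simp only [foldA_eq]
  set l := (list1.zip list2).map Prod.swap with hl
  set agg := l.foldl (fun d p => d.modify p.1 [] (· ++ [p.2])) PySem.Dict.empty with hagg
  have hkeys : agg.keys = PySem.List.dedup ((list1.zip list2).map (fun x => x.2)) := by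
    rw [hagg,
        PySem.Dict.keys_foldl_modify_key l Prod.fst [] (fun _ p v => v ++ [p.2]) PySem.Dict.empty]
    rw [hl, List.map_map]
    simp [PySem.Dict.empty, PySem.Set.update_nil_left, Function.comp_def, Prod.swap, PySem.Dict.keys]
  have hnd : agg.keys.Nodup := by
    rw [hkeys, PySem.List.dedup_eq_ofList]; exact PySem.Set.nodup_ofList _
  have hget : ∀ k, agg.getD k []
      = ((list1.zip list2).filter (fun p => p.2 == k)).map (fun x => x.1) := by
    intro k
    rw [hagg, PySem.Dict.getD_foldl_modify_append, hl, swap_filter_map]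
    simp
  rw [PySem.Dict.values_eq_map_keys agg hnd [], hkeys]
  refine Prod.ext rfl ?_
  exact List.map_congr_left (fun k _ => hget k)
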